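-- pv_equiv track=rewrite | github.com/Nexus-Digital-Automations/Keyboard-Maestro-MCP-2 | src/tokens/km_token_integration.py | _is_safe_for_km_processing
-- ===== SOURCE A (Python) =====
-- def _is_safe_for_km_processing(text: str) -> bool:
--     """Validate text is safe for KM processing to prevent injection."""
--     # Check for dangerous AppleScript patterns
--     dangerous_patterns = [
--         'do shell script',
--         'system events',
--         'mount volume',
--         'unmount',
--         'restart',
--         'shutdown',
--         'tell application "Terminal"',
--         'tell application "Script Editor"',
--         '-- dangerous comment patterns that could hide code',
--     ]
--
--     text_lower = text.lower()
--     for pattern in dangerous_patterns: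
--         if pattern in text_lower:
--             return False
--
--     # Check for excessive nesting or complex patterns
--     if text.count('%') > 50:  # Too many tokens
--         return False
--
--     if text.count('"') > text.count('\\"') + 10:  # Unescaped quotes
--         return False
--
--     return True
-- ===== SOURCE B (Python) =====
-- _DANGEROUS_PATTERNS = [
--     'do shell script',
--     'system events',
--     'mount volume',
--     'unmount',
--     'restart',
--     'shutdown',
--     'tell application "Terminal"',
--     'tell application "Script Editor"',
--     '-- dangerous comment patterns that could hide code',
-- ]
--
--
-- def _is_safe_for_km_processing(text: str) -> bool:
--     """Single left-to-right pass: at each position test whether any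
--     dangerous pattern starts there, instead of nine separate substring
--     scans of the whole text."""
--     low = text.lower()
--     for i in range(len(low)):
--         for p in _DANGEROUS_PATTERNS:
--             if low.startswith(p, i):
--                 return False
--     return text.count('%') <= 50 and text.count('"') <= text.count('\\"') + 10
-- ===== Notes on version B (the rewrite author's own statement) =====
-- stated objective: alternative
-- what changed: Replaces the nine separate whole-text substring scans ('pattern in text_lower' per pattern) with a single left-to-right positional pass that tests at each position whether any dangerous pattern starts there, and collapses the early-return chain for the two count guards into one boolean conjunction.
import Mathlib
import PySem

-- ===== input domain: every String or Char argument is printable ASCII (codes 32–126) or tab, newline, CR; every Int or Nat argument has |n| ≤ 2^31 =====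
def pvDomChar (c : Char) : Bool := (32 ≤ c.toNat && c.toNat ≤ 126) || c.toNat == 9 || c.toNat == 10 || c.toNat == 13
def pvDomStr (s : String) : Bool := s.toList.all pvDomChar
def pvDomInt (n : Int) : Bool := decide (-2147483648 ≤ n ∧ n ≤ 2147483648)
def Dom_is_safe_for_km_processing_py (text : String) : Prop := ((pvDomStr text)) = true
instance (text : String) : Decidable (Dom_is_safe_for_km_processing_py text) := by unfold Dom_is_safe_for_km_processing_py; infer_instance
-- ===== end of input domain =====

-- B replaces A's nine separate whole-text substring scans by a single left-to-right
-- positional pass testing every pattern at each position (objective: alternative).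

-- the dangerous-pattern list shared by both Pythons (same literal list in Source A and Source B)
def pvDangerousPatterns : List (List Char) :=
  ["do shell script".toList,
   "system events".toList,
   "mount volume".toList,
   "unmount".toList,
   "restart".toList,
   "shutdown".toList,
   "tell application \"Terminal\"".toList,
   "tell application \"Script Editor\"".toList,
   "-- dangerous comment patterns that could hide code".toList]

-- ===== PORT A =====
def is_safe_for_km_processing_py (text : String) : Bool :=
  -- 'for pattern in dangerous_patterns: if pattern in text_lower: return False'
  if pvDangerousPatterns.any (fun p => PySem.Chars.isIn p (PySem.Chars.lower text.toList)) then false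
  else if 50 < PySem.Chars.count text.toList "%".toList then false
  else if PySem.Chars.count text.toList "\\\"".toList + 10 < PySem.Chars.count text.toList "\"".toList then false
  else true

-- ===== PORT B =====
-- 'any(low.startswith(p, i) for p in _DANGEROUS_PATTERNS)' at one position i
def pvDangerAt (s : List Char) : Bool :=
  pvDangerousPatterns.any (fun p => PySem.Chars.startswith s p)

-- 'for i in range(len(low)): …' — structural recursion over the suffixes of low
def pvScanDanger : List Char → Bool
  | [] => false
  | c :: rest => pvDangerAt (c :: rest) || pvScanDanger rest

def is_safe_for_km_processing_py_alt (text : String) : Bool :=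
  if pvScanDanger (PySem.Chars.lower text.toList) then false
  else decide (PySem.Chars.count text.toList "%".toList ≤ 50) &&
       decide (PySem.Chars.count text.toList "\"".toList ≤ PySem.Chars.count text.toList "\\\"".toList + 10)

-- ===== PRECONDITION & SPEC =====
def Spec_is_safe_for_km_processing_py (text : String) (out : Bool) : Prop := out = is_safe_for_km_processing_py_alt text
instance (text : String) (out : Bool) : Decidable (Spec_is_safe_for_km_processing_py text out) := by unfold Spec_is_safe_for_km_processing_py; infer_instance

-- ===== CLAIM (what is proved, stated in full; the proofs are below) =====
def Claim_equal_is_safe_for_km_processing_py : Prop := ∀ (text : String), Dom_is_safe_for_km_processing_py text → Spec_is_safe_for_km_processing_py text (is_safe_for_km_processing_py text)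

-- ===== LEMMAS AND PROOFS =====

-- no dangerous pattern is empty (so position len(low) can contribute no match)
theorem pvDangerousPatterns_ne_nil : ∀ p ∈ pvDangerousPatterns, p ≠ [] := by decide

-- the positional scan finds a pattern iff some pattern is a prefix of some suffix
theorem pvScanDanger_iff (s : List Char) :
    pvScanDanger s = true ↔ ∃ p ∈ pvDangerousPatterns, ∃ j, p <+: s.drop j := by
  induction s with
  | nil =>
    simp only [pvScanDanger]
    constructor
    · intro h; exact absurd h (by simp)
    · rintro ⟨p, hp, j, hpre⟩
      simp only [List.drop_nil] at hpre
      exact absurd (List.prefix_nil.mp hpre) (pvDangerousPatterns_ne_nil p hp)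
  | cons c t ih =>
    simp only [pvScanDanger, Bool.or_eq_true, ih, pvDangerAt, List.any_eq_true,
      PySem.Chars.startswith_iff]
    constructor
    · rintro (⟨p, hp, hpre⟩ | ⟨p, hp, j, hpre⟩)
      · exact ⟨p, hp, 0, by simpa using hpre⟩
      · exact ⟨p, hp, j + 1, by simpa using hpre⟩
    · rintro ⟨p, hp, j, hpre⟩
      cases j with
      | zero => exact Or.inl ⟨p, hp, by simpa using hpre⟩
      | succ j => exact Or.inr ⟨p, hp, j, by simpa using hpre⟩

-- the scan agrees with A's per-pattern 'pattern in text_lower' loop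
theorem pvScanDanger_eq_any_isIn (s : List Char) :
    pvScanDanger s = pvDangerousPatterns.any (fun p => PySem.Chars.isIn p s) := by
  rw [Bool.eq_iff_iff, pvScanDanger_iff, List.any_eq_true]
  constructor
  · rintro ⟨p, hp, hj⟩
    exact ⟨p, hp, (PySem.Chars.exists_prefix_drop_iff_isIn p s).mp hj⟩
  · rintro ⟨p, hp, h⟩
    exact ⟨p, hp, (PySem.Chars.exists_prefix_drop_iff_isIn p s).mpr h⟩

-- ===== VERDICT (by name: the statement is the Claim_ definition above) =====
theorem is_safe_for_km_processing_py_spec : Claim_equal_is_safe_for_km_processing_py := by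
  intro text _
  unfold Spec_is_safe_for_km_processing_py
  unfold is_safe_for_km_processing_py is_safe_for_km_processing_py_alt
  rw [pvScanDanger_eq_any_isIn]
  split_ifs with h1 h2 h3 <;> simp_all
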